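-- pv_equiv track=rewrite | github.com/jessies0912/Projects | common.py | checksumCalc
-- ===== SOURCE A (Python) =====
-- def checksumCalc(payload):
--     var = 0
--     # variables
--     checksum = ""
--
--     for c in payload:
--         var += ord(c)
--     var = "{0:b}".format(var)
--
--     for bit in range(len(var)):
--         if var[bit] == "0":
--             checksum += "1"
--         else:
--             checksum += "0"
--
--     return int(checksum, 2)
-- ===== SOURCE B (Python) =====
-- def checksumCalc(payload):
--     s = sum(ord(c) for c in payload)
--     n = max(s.bit_length(), 1)
--     return (1 << n) - 1 - s
-- ===== Notes on version B (the rewrite author's own statement) =====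
-- stated objective: simpler
-- what changed: Replaces the binary-string formatting and per-bit flip loop with a closed-form mask-and-subtract: (1 << max(bit_length,1)) - 1 - sum.
import Mathlib
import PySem

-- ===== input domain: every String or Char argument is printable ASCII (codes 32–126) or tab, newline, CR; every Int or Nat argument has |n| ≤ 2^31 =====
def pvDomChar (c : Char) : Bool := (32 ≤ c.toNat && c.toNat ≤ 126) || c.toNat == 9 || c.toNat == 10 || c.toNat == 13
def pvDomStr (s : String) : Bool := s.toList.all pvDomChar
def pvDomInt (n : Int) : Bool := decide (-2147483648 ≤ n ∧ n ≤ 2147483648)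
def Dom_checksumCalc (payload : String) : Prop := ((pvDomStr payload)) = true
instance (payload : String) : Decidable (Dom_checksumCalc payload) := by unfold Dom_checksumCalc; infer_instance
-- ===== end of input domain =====

-- B replaces A's binary-string formatting and per-bit flip loop with the closed form
-- (2^max(bit_length,1)) - 1 - sum (objective: simpler).

-- ===== PORT A =====
-- hand port of "{0:b}".format(n) for n > 0 (most-significant bit first); exact on Nat
def pvBinAux : Nat → List Char
  | 0 => []
  | n+1 => pvBinAux ((n+1)/2) ++ [if (n+1) % 2 = 1 then '1' else '0']
decreasing_by exact Nat.div_lt_self (Nat.succ_pos n) (by norm_num)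

-- hand port of "{0:b}".format(n): Python formats 0 as "0"
def pvBin (n : Nat) : List Char := if n = 0 then ['0'] else pvBinAux n

-- hand port of int(s, 2); exact on strings of '0'/'1' digits (the only ones A produces)
def pvParseBin (l : List Char) : Nat := l.foldl (fun a c => 2 * a + (if c = '1' then 1 else 0)) 0

def checksumCalc (payload : String) : Int :=
  let var : Nat := payload.toList.foldl (fun a c => a + c.toNat) 0
  let varS : List Char := pvBin var
  let checksum : List Char :=
    (List.range varS.length).foldl
      (fun acc bit => if varS.getD bit ' ' = '0' then acc ++ ['1'] else acc ++ ['0']) []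
  (pvParseBin checksum : Int)

-- ===== PORT B =====
-- hand port of the int.bit_length() builtin; exact on Nat
def pvBitLen : Nat → Nat
  | 0 => 0
  | n+1 => pvBitLen ((n+1)/2) + 1
decreasing_by exact Nat.div_lt_self (Nat.succ_pos n) (by norm_num)

def checksumCalc_alt (payload : String) : Int :=
  let s : Nat := payload.toList.foldl (fun a c => a + c.toNat) 0
  let n : Nat := max (pvBitLen s) 1
  ((2 ^ n - 1 - s : Nat) : Int)

-- ===== PRECONDITION & SPEC =====
def Spec_checksumCalc (payload : String) (out : Int) : Prop := out = checksumCalc_alt payload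
instance (payload : String) (out : Int) : Decidable (Spec_checksumCalc payload out) := by unfold Spec_checksumCalc; infer_instance

-- ===== CLAIM (what is proved, stated in full; the proofs are below) =====
def Claim_equal_checksumCalc : Prop := ∀ (payload : String), Dom_checksumCalc payload → Spec_checksumCalc payload (checksumCalc payload)

-- ===== LEMMAS AND PROOFS =====

def pvFlip (c : Char) : Char := if c = '0' then '1' else '0'

lemma pvParseBin_append (l : List Char) (c : Char) :
    pvParseBin (l ++ [c]) = 2 * pvParseBin l + (if c = '1' then 1 else 0) := by
  simp [pvParseBin, List.foldl_append]

lemma pvBinAux_parse (n : Nat) : pvParseBin (pvBinAux n) = n := by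
  induction n using Nat.strong_induction_on with
  | _ n ih =>
    match n with
    | 0 => simp [pvBinAux, pvParseBin]
    | m+1 =>
      rw [pvBinAux, pvParseBin_append, ih ((m+1)/2) (Nat.div_lt_self (Nat.succ_pos m) (by norm_num))]
      have h := Nat.div_add_mod (m+1) 2
      rcases Nat.mod_two_eq_zero_or_one (m+1) with h2 | h2 <;> simp [h2] <;> omega

lemma pvBinAux_len (n : Nat) : (pvBinAux n).length = pvBitLen n := by
  induction n using Nat.strong_induction_on with
  | _ n ih =>
    match n with
    | 0 => simp [pvBinAux, pvBitLen]
    | m+1 =>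
      rw [pvBinAux, pvBitLen, List.length_append,
        ih ((m+1)/2) (Nat.div_lt_self (Nat.succ_pos m) (by norm_num))]
      simp

lemma pvBinAux_bits (n : Nat) : ∀ c ∈ pvBinAux n, c = '0' ∨ c = '1' := by
  induction n using Nat.strong_induction_on with
  | _ n ih =>
    match n with
    | 0 => simp [pvBinAux]
    | m+1 =>
      intro c hc
      rw [pvBinAux] at hc
      rcases List.mem_append.mp hc with h | h
      · exact ih ((m+1)/2) (Nat.div_lt_self (Nat.succ_pos m) (by norm_num)) c h
      · simp at h; split at h <;> simp [h]

lemma pvBin_parse (n : Nat) : pvParseBin (pvBin n) = n := by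
  unfold pvBin
  split
  · simp [pvParseBin]; omega
  · exact pvBinAux_parse n

lemma pvBin_len (n : Nat) : (pvBin n).length = max (pvBitLen n) 1 := by
  unfold pvBin
  split
  · simp_all [pvBitLen]
  · rw [pvBinAux_len]
    match n with
    | 0 => omega
    | m+1 => rw [pvBitLen]; omega

lemma pvBin_bits (n : Nat) : ∀ c ∈ pvBin n, c = '0' ∨ c = '1' := by
  unfold pvBin
  split
  · simp
  · exact pvBinAux_bits n

-- the sum over flipped and unflipped digits: parse(map flip l) + parse l + 1 = 2^len
lemma pvParse_flip (l : List Char) (hb : ∀ c ∈ l, c = '0' ∨ c = '1') :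
    pvParseBin (l.map pvFlip) + pvParseBin l + 1 = 2 ^ l.length := by
  induction l using List.reverseRecOn with
  | nil => simp [pvParseBin]
  | append_singleton l c ih =>
    have hb' : ∀ c ∈ l, c = '0' ∨ c = '1' := fun x hx => hb x (List.mem_append.mpr (Or.inl hx))
    have hc : c = '0' ∨ c = '1' := hb c (List.mem_append.mpr (Or.inr (by simp)))
    have hrec := ih hb'
    rw [List.map_append, List.map_singleton, pvParseBin_append, pvParseBin_append,
      List.length_append]
    rcases hc with h | h <;> simp [h, pvFlip] <;> ring_nf <;> omega

-- A's flip loop builds (l.take n).map pvFlip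
lemma pvLoop_take (l : List Char) (n : Nat) (hn : n ≤ l.length) :
    (List.range n).foldl
      (fun acc bit => if l.getD bit ' ' = '0' then acc ++ ['1'] else acc ++ ['0']) []
      = (l.take n).map pvFlip := by
  induction n with
  | zero => simp
  | succ m ih =>
    rw [List.range_succ, List.foldl_append, ih (by omega)]
    have hm : m < l.length := by omega
    have ht : l.take (m+1) = l.take m ++ [l.getD m ' '] := by
      rw [List.getD_eq_getElem l ' ' hm, List.take_add_one, List.getElem?_eq_getElem hm]
      rfl
    rw [ht, List.map_append, List.map_singleton]
    simp only [List.foldl_cons, List.foldl_nil]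
    unfold pvFlip
    split <;> rfl

lemma pvLoop_full (l : List Char) :
    (List.range l.length).foldl
      (fun acc bit => if l.getD bit ' ' = '0' then acc ++ ['1'] else acc ++ ['0']) []
      = l.map pvFlip := by
  rw [pvLoop_take l l.length (le_refl _), List.take_length]

-- ===== VERDICT (by name: the statement is the Claim_ definition above) =====
theorem checksumCalc_spec : Claim_equal_checksumCalc := by
  intro payload _
  unfold Spec_checksumCalc checksumCalc checksumCalc_alt
  set s : Nat := payload.toList.foldl (fun a c => a + c.toNat) 0 with hs
  simp only []
  rw [pvLoop_full (pvBin s)]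
  have hflip := pvParse_flip (pvBin s) (pvBin_bits s)
  rw [pvBin_parse s, pvBin_len s] at hflip
  have hpos : 0 < 2 ^ max (pvBitLen s) 1 := Nat.two_pow_pos _
  congr 1
  omega
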